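-- pv_equiv track=rewrite | github.com/matija13795/Deep-Learning-Music-Gen | OLD/preprocessing/abc_parser.py | extract_melody_with_context
-- ===== SOURCE A (Python) =====
-- def extract_melody_with_context(tune):
--     """
--     Extracts the essential musical information and melody from an ABC tune.
--     Automatically fills in a default L: value if missing, based on M: (meter).
--
--     Parameters:
--         tune (str): A raw ABC tune.
--
--     Returns:
--         A string containing only the essential musical context and the melody.
--
--     Notes:
--         In ABC notation, tunes begin with a header section that may contain many fields.
--         Only some of these fields are musically relevant to interpreting the notes.
--
--         We keep:
--             - M: Meter (e.g., "M:4/4")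
--             - L: Default note length (e.g., "L:1/8")
--             - K: Key signature (e.g., "K:Cmaj")
--
--         These fields are needed to interpret rhythm and pitch correctly.
--
--         We discard:
--             - X: Tune number (just an ID)
--             - T: Title
--             - N:, C:, Z:, Q:, etc. — any fields that are comments, composer names,
--               tempo hints, etc., which are often inconsistent or irrelevant for modeling.
--
--         Once we reach the 'K:' line (the key signature), we start including melody lines,
--         which contain the actual note sequences.
--
--         Rules for default L:
--         - If no L: line is provided, compute decimal value of the meter (M:)
--         - If meter >= 0.75 → default to L:1/8
--         - If meter <  0.75 → default to L:1/16
--     """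
--     lines = tune.strip().splitlines()
--
--     meter_line = None
--     length_line = None
--     key_line = None
--     melody_lines = []
--
--     header_done = False
--
--     for line in lines:
--         line = line.strip()
--         if not line:
--             continue
--
--         if not header_done:
--             if line.startswith("M:") and meter_line is None:
--                 meter_line = line
--             elif line.startswith("L:") and length_line is None:
--                 length_line = line
--             elif line.startswith("K:") and key_line is None:
--                 key_line = line
--                 header_done = True  # everything after this is melody
--         else:
--             melody_lines.append(line)
--
--     # Synthesize L: if missing
--     if length_line is None:
--         default_length = "1/8"  # fallback
--         if meter_line:
--             try:
--                 meter_value = meter_line[2:].strip()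
--                 num, denom = map(int, meter_value.split('/'))
--                 meter_decimal = num / denom
--                 default_length = "1/8" if meter_decimal >= 0.75 else "1/16"
--             except Exception:
--                 pass
--         length_line = f"L:{default_length}"
--
--     header = []
--     if meter_line:
--         header.append(meter_line)
--     if length_line:
--         header.append(length_line)
--     if key_line:
--         header.append(key_line)
--
--     return ' '.join(header + melody_lines)
-- ===== SOURCE B (Python) =====
-- def extract_melody_with_context(tune):
--     """Tag-index re-implementation: clean the lines, split them at the first K:
--     line, then build a {first-two-chars: line} index over the REVERSED header
--     prefix (last write wins, so the earliest forward occurrence of each tag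
--     survives) and simply look M:/L: up in that index."""
--     cleaned = [s for s in map(str.strip, tune.strip().splitlines()) if s]
--     header_part, key_line, melody_lines = cleaned, None, []
--     for i, l in enumerate(cleaned):
--         if l.startswith("K:"):
--             header_part, key_line, melody_lines = cleaned[:i], l, cleaned[i + 1:]
--             break
--     index = {l[:2]: l for l in reversed(header_part)}
--     meter_line = index.get("M:")
--     length_line = index.get("L:")
--     if length_line is None:
--         default_length = "1/8"
--         if meter_line:
--             try:
--                 num, denom = map(int, meter_line[2:].strip().split('/'))
--                 default_length = "1/8" if num / denom >= 0.75 else "1/16"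
--             except Exception:
--                 pass
--         length_line = "L:" + default_length
--     header = [l for l in (meter_line, length_line, key_line) if l is not None]
--     return ' '.join(header + melody_lines)
-- ===== Notes on version B (the rewrite author's own statement) =====
-- stated objective: alternative
-- what changed: Replaces A's single-pass state machine (meter/length/key flags and header_done mutated line by line) with a staged pipeline: clean the lines, split them at the first K: line, then build a {first-two-chars: line} dictionary over the REVERSED header prefix so the earliest occurrence of each tag survives, and read M:/L: out of that index; the default-L synthesis and the join are reused unchanged.
import Mathlib
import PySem

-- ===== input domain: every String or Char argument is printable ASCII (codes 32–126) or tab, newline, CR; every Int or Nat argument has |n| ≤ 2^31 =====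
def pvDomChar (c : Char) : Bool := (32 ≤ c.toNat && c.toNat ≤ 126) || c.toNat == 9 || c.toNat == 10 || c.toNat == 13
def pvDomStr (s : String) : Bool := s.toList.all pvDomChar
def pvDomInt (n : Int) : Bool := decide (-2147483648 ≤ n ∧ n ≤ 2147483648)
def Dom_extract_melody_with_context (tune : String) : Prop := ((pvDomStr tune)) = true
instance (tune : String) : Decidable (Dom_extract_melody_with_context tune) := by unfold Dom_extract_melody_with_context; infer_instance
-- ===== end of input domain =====

-- B replaces A's one-pass header/melody state machine by: clean the lines, split at the first
-- K: line, build a {first-two-chars ↦ line} dictionary over the REVERSED header prefix (so the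
-- earliest occurrence of each tag wins) and look M:/L: up in it (objective: alternative).

-- Shared helper: the default-L synthesis, textually identical in A and B ("Synthesize L: if
-- missing").  Python's float comparison `num / denom >= 0.75` is ported as the exact rational
-- comparison (0.75 is exactly representable; exact except when the double-rounded quotient
-- crosses 0.75 or overflows, which needs operands far beyond any realistic meter).  Every
-- exception of the try block (wrong split shape, int() failure, denom = 0) falls to "1/8".
def synthL (meterLine : Option String) : String :=
  let d : String :=
    match meterLine with
    | none => "1/8"   -- `if meter_line:` — when set it starts with "M:", hence non-empty: the None test
    | some m =>
      match PySem.Str.split? (PySem.Str.strip (PySem.Str.slice m (some 2) none)) "/" with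
      | some [a, b] =>
        match PySem.Int.ofStr? a, PySem.Int.ofStr? b with
        | some num, some den =>
          if den = 0 then "1/8"   -- ZeroDivisionError → except: pass
          else if (0 < den ∧ 3 * den ≤ 4 * num) ∨ (den < 0 ∧ 4 * num ≤ 3 * den) then "1/8"
          else "1/16"
        | _, _ => "1/8"
      | _ => "1/8"
  "L:" ++ d

-- ===== PORT A =====
-- A's loop state: (meter_line, length_line, key_line, melody_lines, header_done)
def stepA (st : Option String × Option String × Option String × List String × Bool)
    (rawLine : String) : Option String × Option String × Option String × List String × Bool :=
  let l := PySem.Str.strip rawLine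
  if PySem.Str.len l == 0 then st     -- `if not line: continue`
  else
    match st with
    | (m, le, k, mel, done) =>
      if !done then
        if PySem.Str.startswith l "M:" && m.isNone then (some l, le, k, mel, done)
        else if PySem.Str.startswith l "L:" && le.isNone then (m, some l, k, mel, done)
        else if PySem.Str.startswith l "K:" && k.isNone then (m, le, some l, mel, true)
        else (m, le, k, mel, done)
      else (m, le, k, mel ++ [l], done)

def extract_melody_with_context (tune : String) : String :=
  let lines := PySem.Str.splitlines (PySem.Str.strip tune)
  match lines.foldl stepA (none, none, none, [], false) with
  | (meterLine, lengthLine, keyLine, melodyLines, _) =>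
    let lengthLine' := match lengthLine with
      | some s => s
      | none => synthL meterLine
    -- header appends; `if length_line:` is always true after synthesis (non-empty string)
    let header := (match meterLine with | some s => [s] | none => [])
      ++ [lengthLine']
      ++ (match keyLine with | some s => [s] | none => [])
    PySem.Str.join " " (header ++ melodyLines)

-- ===== PORT B =====
-- `for i, l in enumerate(cleaned): if l.startswith("K:"): … break` with the slices
-- cleaned[:i] / cleaned[i+1:]: recursion building the prefix before the first K: line
def splitK : List String → Option (List String × String × List String)
  | [] => none
  | l :: t =>
    if PySem.Str.startswith l "K:" then some ([], l, t)
    else (splitK t).map (fun p => (l :: p.1, p.2.1, p.2.2))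

def extract_melody_with_context_alt (tune : String) : String :=
  let cleaned := ((PySem.Str.splitlines (PySem.Str.strip tune)).map PySem.Str.strip).filter
    (fun s => !(PySem.Str.len s == 0))
  let (header_part, key_line, melody_lines) :=
    match splitK cleaned with
    | some (h, k, m) => (h, some k, m)
    | none => (cleaned, (none : Option String), ([] : List String))
  -- `index = {l[:2]: l for l in reversed(header_part)}`
  let index := header_part.reverse.foldl
    (fun d l => d.insert (PySem.Str.slice l none (some 2)) l) (PySem.Dict.empty)
  let meter_line := index.get? "M:"
  let length_line := index.get? "L:"
  let length_line' := match length_line with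
    | some s => s
    | none => synthL meter_line
  let header := [meter_line, some length_line', key_line].filterMap id
  PySem.Str.join " " (header ++ melody_lines)

-- ===== PRECONDITION & SPEC =====
def Spec_extract_melody_with_context (tune : String) (out : String) : Prop := out = extract_melody_with_context_alt tune
instance (tune : String) (out : String) : Decidable (Spec_extract_melody_with_context tune out) := by unfold Spec_extract_melody_with_context; infer_instance

-- ===== CLAIM (what is proved, stated in full; the proofs are below) =====
def Claim_equal_extract_melody_with_context : Prop := ∀ (tune : String), Dom_extract_melody_with_context tune → Spec_extract_melody_with_context tune (extract_melody_with_context tune)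

-- ===== LEMMAS AND PROOFS =====

-- A's loop body once the strip/skip-empty wrapper has been factored out
def coreA (st : Option String × Option String × Option String × List String × Bool)
    (l : String) : Option String × Option String × Option String × List String × Bool :=
  match st with
  | (m, le, k, mel, done) =>
    if !done then
      if PySem.Str.startswith l "M:" && m.isNone then (some l, le, k, mel, done)
      else if PySem.Str.startswith l "L:" && le.isNone then (m, some l, k, mel, done)
      else if PySem.Str.startswith l "K:" && k.isNone then (m, le, some l, mel, true)
      else (m, le, k, mel, done)
    else (m, le, k, mel ++ [l], done)

lemma stepA_eq (st : Option String × Option String × Option String × List String × Bool)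
    (raw : String) :
    stepA st raw =
      if !(PySem.Str.len (PySem.Str.strip raw) == 0) then coreA st (PySem.Str.strip raw) else st := by
  unfold stepA coreA
  cases h : (PySem.Str.len (PySem.Str.strip raw) == 0) with
  | true => rw [if_pos h, if_neg (by decide)]
  | false => rw [if_neg (by rw [h]; decide), if_pos (by decide)]

lemma foldl_stepA (lines : List String)
    (st : Option String × Option String × Option String × List String × Bool) :
    lines.foldl stepA st =
      (((lines.map PySem.Str.strip).filter (fun s => !(PySem.Str.len s == 0))).foldl coreA st) := by
  rw [← PySem.List.foldl_if_eq_foldl_filter, List.foldl_map]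
  exact PySem.List.foldl_congr_mem _ _ _ _ (fun st' raw _ => stepA_eq st' raw)

-- two distinct "X:" prefixes cannot both start the same line
lemma two_prefix_false (cs : List Char) (c d : Char) (hcd : c ≠ d)
    (h : PySem.Chars.startswith cs [c, ':'] = true) :
    PySem.Chars.startswith cs [d, ':'] = false := by
  by_contra hd
  rw [Bool.not_eq_false] at hd
  rw [PySem.Chars.startswith_iff] at h hd
  obtain ⟨t1, e1⟩ := h
  obtain ⟨t2, e2⟩ := hd
  rw [← e1] at e2
  simp at e2
  exact hcd e2.1.symm

lemma M_not_L (l : String) (h : PySem.Str.startswith l "M:" = true) :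
    PySem.Str.startswith l "L:" = false := by
  have h' : PySem.Chars.startswith l.toList ['M', ':'] = true := by simpa using h
  simpa using two_prefix_false l.toList 'M' 'L' (by decide) h'

lemma L_not_M (l : String) (h : PySem.Str.startswith l "L:" = true) :
    PySem.Str.startswith l "M:" = false := by
  have h' : PySem.Chars.startswith l.toList ['L', ':'] = true := by simpa using h
  simpa using two_prefix_false l.toList 'L' 'M' (by decide) h'

lemma K_not_M (l : String) (h : PySem.Str.startswith l "K:" = true) :
    PySem.Str.startswith l "M:" = false := by
  have h' : PySem.Chars.startswith l.toList ['K', ':'] = true := by simpa using h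
  simpa using two_prefix_false l.toList 'K' 'M' (by decide) h'

lemma K_not_L (l : String) (h : PySem.Str.startswith l "K:" = true) :
    PySem.Str.startswith l "L:" = false := by
  have h' : PySem.Chars.startswith l.toList ['K', ':'] = true := by simpa using h
  simpa using two_prefix_false l.toList 'K' 'L' (by decide) h'

lemma foldl_coreA_done (ls : List String) :
    ∀ (m le k : Option String) (mel : List String),
      ls.foldl coreA (m, le, k, mel, true) = (m, le, k, mel ++ ls, true) := by
  induction ls with
  | nil => intro m le k mel; simp
  | cons l t ih =>
    intro m le k mel
    simp only [List.foldl_cons]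
    have : coreA (m, le, k, mel, true) l = (m, le, k, mel ++ [l], true) := by rfl
    rw [this, ih]
    simp

-- index of the first K: line (length if absent)
def kIdx (ls : List String) : Nat :=
  (ls.findIdx? (fun l => PySem.Str.startswith l "K:")).getD ls.length

lemma kIdx_cons_of_not (l : String) (ls : List String)
    (h : PySem.Str.startswith l "K:" = false) : kIdx (l :: ls) = kIdx ls + 1 := by
  unfold kIdx
  rw [List.findIdx?_cons, h]
  cases ls.findIdx? (fun l => PySem.Str.startswith l "K:") <;> simp

lemma foldl_coreA_header (ls : List String) :
    ∀ (m le : Option String) (mel : List String),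
      ls.foldl coreA (m, le, none, mel, false) =
        (m.or ((ls.take (kIdx ls)).find? (fun l => PySem.Str.startswith l "M:")),
         le.or ((ls.take (kIdx ls)).find? (fun l => PySem.Str.startswith l "L:")),
         ls[kIdx ls]?,
         mel ++ ls.drop (kIdx ls + 1),
         (ls.findIdx? (fun l => PySem.Str.startswith l "K:")).isSome) := by
  induction ls with
  | nil => intro m le mel; simp [kIdx]
  | cons l t ih =>
    intro m le mel
    simp only [List.foldl_cons]
    by_cases hK : PySem.Str.startswith l "K:" = true
    · -- K: line: header closes here
      have hM := K_not_M l hK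
      have hL := K_not_L l hK
      have hstep : coreA (m, le, none, mel, false) l = (m, le, some l, mel, true) := by
        simp only [coreA]
        rw [if_pos (show (!false) = true by rfl), if_neg (by rw [hM]; simp),
          if_neg (by rw [hL]; simp), if_pos (by rw [hK]; rfl)]
      rw [hstep, foldl_coreA_done]
      have hidx : (l :: t).findIdx? (fun l => PySem.Str.startswith l "K:") = some 0 := by
        rw [List.findIdx?_cons, hK]; simp
      have hk0 : kIdx (l :: t) = 0 := by unfold kIdx; rw [hidx]; rfl
      rw [hidx, hk0]
      simp
    · rw [Bool.not_eq_true] at hK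
      have hk1 : kIdx (l :: t) = kIdx t + 1 := kIdx_cons_of_not l t hK
      have hidx : ((l :: t).findIdx? (fun l => PySem.Str.startswith l "K:")).isSome
          = (t.findIdx? (fun l => PySem.Str.startswith l "K:")).isSome := by
        rw [List.findIdx?_cons, hK]; simp
      have htake : (l :: t).take (kIdx (l :: t)) = l :: t.take (kIdx t) := by
        rw [hk1]; rfl
      have hget : (l :: t)[kIdx (l :: t)]? = t[kIdx t]? := by rw [hk1]; rfl
      have hdrop : (l :: t).drop (kIdx (l :: t) + 1) = t.drop (kIdx t + 1) := by
        rw [hk1]; rfl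
      by_cases h1 : (PySem.Str.startswith l "M:" && m.isNone) = true
      · obtain ⟨hM, hm⟩ := Bool.and_eq_true_iff.mp h1
        have hL := M_not_L l hM
        rw [Option.isNone_iff_eq_none] at hm
        subst hm
        have hstep : coreA (none, le, none, mel, false) l = (some l, le, none, mel, false) := by
          simp only [coreA]
          rw [if_pos (show (!false) = true by rfl), if_pos (by rw [hM]; rfl)]
        rw [hstep, ih, htake, hget, hdrop, hidx]
        simp only [List.find?_cons, hM, hL]
        rfl
      · by_cases h2 : (PySem.Str.startswith l "L:" && le.isNone) = true
        · obtain ⟨hL, hle⟩ := Bool.and_eq_true_iff.mp h2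
          have hM := L_not_M l hL
          rw [Option.isNone_iff_eq_none] at hle
          subst hle
          have hstep : coreA (m, none, none, mel, false) l = (m, some l, none, mel, false) := by
            simp only [coreA]
            rw [if_pos (show (!false) = true by rfl), if_neg (by rw [hM]; simp),
              if_pos (by rw [hL]; rfl)]
          rw [hstep, ih, htake, hget, hdrop, hidx]
          simp only [List.find?_cons, hM, hL]
          rfl
        · -- skipped line: no field changes
          have hstep : coreA (m, le, none, mel, false) l = (m, le, none, mel, false) := by
            simp only [coreA]
            rw [if_pos (show (!false) = true by rfl), if_neg h1, if_neg h2,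
              if_neg (by rw [hK]; simp)]
          have hMcomp : m.or (List.find? (fun l => PySem.Str.startswith l "M:") (l :: t.take (kIdx t)))
              = m.or (List.find? (fun l => PySem.Str.startswith l "M:") (t.take (kIdx t))) := by
            cases hM : PySem.Str.startswith l "M:" with
            | false => simp only [List.find?_cons]; rw [hM]
            | true =>
              have hm : m ≠ none := by intro h; rw [h] at h1; rw [hM] at h1; exact h1 rfl
              obtain ⟨a, rfl⟩ := Option.ne_none_iff_exists'.mp hm
              rfl
          have hLcomp : le.or (List.find? (fun l => PySem.Str.startswith l "L:") (l :: t.take (kIdx t)))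
              = le.or (List.find? (fun l => PySem.Str.startswith l "L:") (t.take (kIdx t))) := by
            cases hL : PySem.Str.startswith l "L:" with
            | false => simp only [List.find?_cons]; rw [hL]
            | true =>
              have hle : le ≠ none := by intro h; rw [h] at h2; rw [hL] at h2; exact h2 rfl
              obtain ⟨a, rfl⟩ := Option.ne_none_iff_exists'.mp hle
              rfl
          rw [hstep, ih, htake, hget, hdrop, hidx, hMcomp, hLcomp]

-- B-side: splitK computes take/get?/drop at the first K: index
lemma split_fields (ls : List String) :
    (match splitK ls with
     | some (h, k, m) => (h, some k, m)
     | none => (ls, (none : Option String), ([] : List String)))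
    = (ls.take (kIdx ls), ls[kIdx ls]?, ls.drop (kIdx ls + 1)) := by
  induction ls with
  | nil => simp [splitK, kIdx]
  | cons l t ih =>
    by_cases hK : PySem.Str.startswith l "K:" = true
    · have hk0 : kIdx (l :: t) = 0 := by
        unfold kIdx; rw [List.findIdx?_cons, hK]; rfl
      have hK' : PySem.Chars.startswith l.toList ['K', ':'] = true := by simpa using hK
      simp [splitK, hK', hk0]
    · rw [Bool.not_eq_true] at hK
      have hk1 : kIdx (l :: t) = kIdx t + 1 := kIdx_cons_of_not l t hK
      simp only [splitK, hK, Bool.false_eq_true, if_false]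
      cases hs : splitK t with
      | none =>
        rw [hs] at ih
        simp only at ih
        have e1 : t = t.take (kIdx t) := congrArg Prod.fst ih
        have e2 : (none : Option String) = t[kIdx t]? := congrArg (fun p => p.2.1) ih
        have e3 : ([] : List String) = t.drop (kIdx t + 1) := congrArg (fun p => p.2.2) ih
        simp only [Option.map_none]
        rw [hk1]
        refine Prod.ext ?_ (Prod.ext ?_ ?_) <;> simp only
        · rw [List.take_succ_cons, ← e1]
        · rw [List.getElem?_cons_succ, ← e2]
        · rw [show kIdx t + 1 + 1 = kIdx t + 2 by ring, List.drop_succ_cons, ← e3]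
      | some p =>
        obtain ⟨h, k, m⟩ := p
        rw [hs] at ih
        simp only at ih
        have e1 : h = t.take (kIdx t) := congrArg Prod.fst ih
        have e2 : some k = t[kIdx t]? := congrArg (fun p => p.2.1) ih
        have e3 : m = t.drop (kIdx t + 1) := congrArg (fun p => p.2.2) ih
        simp only [Option.map_some]
        rw [hk1]
        refine Prod.ext ?_ (Prod.ext ?_ ?_) <;> simp only
        · rw [List.take_succ_cons, ← e1]
        · rw [List.getElem?_cons_succ, ← e2]
        · rw [show kIdx t + 1 + 1 = kIdx t + 2 by ring, List.drop_succ_cons, ← e3]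

-- `l[:2] == tag` (a two-character tag) is exactly `l.startswith(tag)`
lemma tag2_eq_iff (tag l : String) (h2 : tag.toList.length = 2) :
    (tag = PySem.Str.slice l none (some 2)) ↔ PySem.Str.startswith l tag = true := by
  have hsl : (PySem.Str.slice l none (some 2)).toList = l.toList.take 2 := by
    simp [PySem.Str.toList_slice]
    rw [show (2 : Int) = ((2 : Nat) : Int) by norm_num, PySem.List.slice_to_natCast]
  constructor
  · intro h
    have : tag.toList = l.toList.take 2 := by rw [h, hsl]
    rw [PySem.Str.startswith_eq, PySem.Chars.startswith_iff, List.prefix_iff_eq_take, h2]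
    exact this
  · intro h
    rw [PySem.Str.startswith_eq, PySem.Chars.startswith_iff, List.prefix_iff_eq_take, h2] at h
    apply String.toList_inj.mp
    rw [hsl]
    exact h

-- the dict built over the reversed prefix: last write wins = first forward occurrence
lemma get_revIndex (ls : List String) (tag : String) (h2 : tag.toList.length = 2) :
    (ls.reverse.foldl
        (fun d l => d.insert (PySem.Str.slice l none (some 2)) l)
        (PySem.Dict.empty : PySem.Dict String String)).get? tag
      = ls.find? (fun l => PySem.Str.startswith l tag) := by
  induction ls with
  | nil => simp [PySem.Dict.get?_empty]
  | cons l t ih =>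
    rw [List.reverse_cons, List.foldl_append]
    simp only [List.foldl_cons, List.foldl_nil, List.find?_cons]
    rw [PySem.Dict.get?_insert, ih]
    by_cases h : PySem.Str.startswith l tag = true
    · rw [if_pos ((tag2_eq_iff tag l h2).mpr h), h]
    · rw [Bool.not_eq_true] at h
      rw [if_neg (fun he => by rw [(tag2_eq_iff tag l h2).mp he] at h; cases h), h]

-- ===== VERDICT (by name: the statement is the Claim_ definition above) =====
theorem extract_melody_with_context_spec : Claim_equal_extract_melody_with_context := by
  intro tune _
  unfold Spec_extract_melody_with_context
  unfold extract_melody_with_context extract_melody_with_context_alt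
  simp only [foldl_stepA, split_fields, foldl_coreA_header, Option.none_or, List.nil_append,
    get_revIndex _ "M:" (by decide), get_revIndex _ "L:" (by decide)]
  generalize (((PySem.Str.splitlines (PySem.Str.strip tune)).map PySem.Str.strip).filter
      (fun s => !(PySem.Str.len s == 0))) = ls
  generalize ((ls.take (kIdx ls)).find? (fun l => PySem.Str.startswith l "M:")) = F
  generalize ((ls.take (kIdx ls)).find? (fun l => PySem.Str.startswith l "L:")) = G
  generalize ls[kIdx ls]? = Z
  cases F <;> cases G <;> cases Z <;> simp [List.filterMap]
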